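-- pv_equiv track=rewrite | github.com/henny-kim/parca_simplified | comparative_ai_extractor.py | _parse_abstracts
-- ===== SOURCE A (Python) =====
-- from typing import Dict, List, Optional, Tuple
--
-- def _parse_abstracts(text: str) -> List[Dict]:
--     """Parse PubMed abstract text into structured data"""
--     abstracts = []
--     current_abstract = {}
--     lines = text.split('\n')
--
--     for line in lines:
--         if line.startswith('PMID:'):
--             if current_abstract:
--                 abstracts.append(current_abstract)
--             current_abstract = {'pmid': line.split(':')[1].strip()}
--         elif line.startswith('DOI:'):
--             current_abstract['doi'] = line.split(':')[1].strip()
--         elif line.startswith('Title:'):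
--             current_abstract['title'] = line.split(':', 1)[1].strip()
--         elif line.startswith('Author information:'):
--             current_abstract['authors'] = line.split(':', 1)[1].strip()
--         elif line.startswith('ABSTRACT:'):
--             current_abstract['abstract'] = line.split(':', 1)[1].strip()
--         elif current_abstract.get('abstract') and line.strip():
--             current_abstract['abstract'] += ' ' + line.strip()
--
--     if current_abstract:
--         abstracts.append(current_abstract)
--
--     return abstracts
-- ===== SOURCE B (Python) =====
-- def _build_record(group):
--     rec = {}
--     for line in group:
--         if line.startswith('PMID:'):
--             rec['pmid'] = line.split(':')[1].strip()
--         elif line.startswith('DOI:'):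
--             rec['doi'] = line.split(':')[1].strip()
--         elif line.startswith('Title:'):
--             rec['title'] = line.split(':', 1)[1].strip()
--         elif line.startswith('Author information:'):
--             rec['authors'] = line.split(':', 1)[1].strip()
--         elif line.startswith('ABSTRACT:'):
--             rec['abstract'] = line.split(':', 1)[1].strip()
--         elif rec.get('abstract') and line.strip():
--             rec['abstract'] += ' ' + line.strip()
--     return rec
--
-- def _parse_abstracts(text):
--     groups = [[]]
--     for line in text.split('\n'):
--         if line.startswith('PMID:'):
--             groups.append([line])
--         else:
--             groups[-1].append(line)
--     return [rec for rec in map(_build_record, groups) if rec]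
-- ===== Notes on version B (the rewrite author's own statement) =====
-- stated objective: alternative
-- what changed: Replaces A's single-pass accumulator (finished records + mutable current record) by a two-phase decomposition: first partition the lines into PMID-delimited groups (with a leading group for lines before the first PMID), then map each group to a record and keep the non-empty ones.
import Mathlib
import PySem

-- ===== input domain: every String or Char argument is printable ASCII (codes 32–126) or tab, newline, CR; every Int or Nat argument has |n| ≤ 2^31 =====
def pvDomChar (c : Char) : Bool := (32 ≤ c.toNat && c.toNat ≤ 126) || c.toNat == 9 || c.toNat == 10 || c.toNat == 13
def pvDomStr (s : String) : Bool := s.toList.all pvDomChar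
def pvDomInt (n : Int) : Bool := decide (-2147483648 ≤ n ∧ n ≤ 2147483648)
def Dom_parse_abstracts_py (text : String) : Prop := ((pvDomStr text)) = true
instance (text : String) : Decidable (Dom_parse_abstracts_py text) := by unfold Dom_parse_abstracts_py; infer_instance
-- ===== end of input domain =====

-- B re-implements the parser as a two-phase decomposition (split lines into PMID-delimited
-- groups, then build one record per group and drop empty ones); same return value, objective: alternative decomposition.

-- line.split(':')[1].strip()  (guarded by startswith, so index 1 exists)
def pvColonField (line : String) : String :=
  PySem.Str.strip (((PySem.Str.split? line ":").getD []).getD 1 "")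

-- line.split(':', 1)[1].strip()
def pvColonRest (line : String) : String :=
  PySem.Str.strip (((PySem.Str.splitMax? line ":" 1).getD []).getD 1 "")

-- ===== PORT A =====  (one pass: accumulator of finished records + the current record)
def pvStepA (st : List (PySem.Dict String String) × PySem.Dict String String) (line : String) :
    List (PySem.Dict String String) × PySem.Dict String String :=
  if PySem.Str.startswith line "PMID:" then
    ((if st.2.items.isEmpty then st.1 else st.1 ++ [st.2]),
     PySem.Dict.empty.insert "pmid" (pvColonField line))
  else if PySem.Str.startswith line "DOI:" then
    (st.1, st.2.insert "doi" (pvColonField line))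
  else if PySem.Str.startswith line "Title:" then
    (st.1, st.2.insert "title" (pvColonRest line))
  else if PySem.Str.startswith line "Author information:" then
    (st.1, st.2.insert "authors" (pvColonRest line))
  else if PySem.Str.startswith line "ABSTRACT:" then
    (st.1, st.2.insert "abstract" (pvColonRest line))
  else if (st.2.getD "abstract" "") ≠ "" ∧ PySem.Str.strip line ≠ "" then
    (st.1, st.2.insert "abstract" ((st.2.getD "abstract" "") ++ " " ++ PySem.Str.strip line))
  else st

def parse_abstracts_py (text : String) : List (List (String × String)) :=
  let lines := (PySem.Str.split? text "\n").getD []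
  let st := lines.foldl pvStepA ([], PySem.Dict.empty)
  (if st.2.items.isEmpty then st.1 else st.1 ++ [st.2]).map (·.items)

-- ===== PORT B =====  (phase 1: partition the lines into groups, each 'PMID:' line starting a new group)
def pvAppendLast : List (List String) → String → List (List String)
  | [], l => [[l]]          -- unreachable: the groups list always starts non-empty
  | [g], l => [g ++ [l]]
  | g :: g' :: gs, l => g :: pvAppendLast (g' :: gs) l

def pvStepG (gs : List (List String)) (line : String) : List (List String) :=
  if PySem.Str.startswith line "PMID:" then gs ++ [[line]] else pvAppendLast gs line

-- phase 2: build one record from one group of lines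
def pvStepR (rec : PySem.Dict String String) (line : String) : PySem.Dict String String :=
  if PySem.Str.startswith line "PMID:" then
    rec.insert "pmid" (pvColonField line)
  else if PySem.Str.startswith line "DOI:" then
    rec.insert "doi" (pvColonField line)
  else if PySem.Str.startswith line "Title:" then
    rec.insert "title" (pvColonRest line)
  else if PySem.Str.startswith line "Author information:" then
    rec.insert "authors" (pvColonRest line)
  else if PySem.Str.startswith line "ABSTRACT:" then
    rec.insert "abstract" (pvColonRest line)
  else if (rec.getD "abstract" "") ≠ "" ∧ PySem.Str.strip line ≠ "" then
    rec.insert "abstract" ((rec.getD "abstract" "") ++ " " ++ PySem.Str.strip line)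
  else rec

def pvBuildRecord (g : List String) : PySem.Dict String String :=
  g.foldl pvStepR PySem.Dict.empty

def parse_abstracts_py_alt (text : String) : List (List (String × String)) :=
  let groups := ((PySem.Str.split? text "\n").getD []).foldl pvStepG [[]]
  (((groups.map pvBuildRecord).filter (fun r => !r.items.isEmpty)).map (·.items))

-- ===== PRECONDITION & SPEC =====
def Spec_parse_abstracts_py (text : String) (out : List (List (String × String))) : Prop := out = parse_abstracts_py_alt text
instance (text : String) (out : List (List (String × String))) : Decidable (Spec_parse_abstracts_py text out) := by unfold Spec_parse_abstracts_py; infer_instance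

-- ===== CLAIM (what is proved, stated in full; the proofs are below) =====
def Claim_equal_parse_abstracts_py : Prop := ∀ (text : String), Dom_parse_abstracts_py text → Spec_parse_abstracts_py text (parse_abstracts_py text)

-- ===== LEMMAS AND PROOFS =====

-- recursive description of B's grouping phase, with g the current (last) open group
def pvSplitRest (g : List String) : List String → List (List String)
  | [] => [g]
  | l :: ls =>
    if PySem.Str.startswith l "PMID:" then g :: pvSplitRest [l] ls
    else pvSplitRest (g ++ [l]) ls

lemma pvAppendLast_append (gs : List (List String)) (g : List String) (l : String) :
    pvAppendLast (gs ++ [g]) l = gs ++ [g ++ [l]] := by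
  induction gs with
  | nil => rfl
  | cons g0 gs ih =>
    cases gs with
    | nil => rfl
    | cons g1 gs' => simpa [pvAppendLast] using ih

lemma pvGroups_eq (lines : List String) : ∀ (gs : List (List String)) (g : List String),
    lines.foldl pvStepG (gs ++ [g]) = gs ++ pvSplitRest g lines := by
  induction lines with
  | nil => intro gs g; simp [pvSplitRest]
  | cons l ls ih =>
    intro gs g
    by_cases h : PySem.Str.startswith l "PMID:" = true
    · have h' := h; simp at h'
      rw [List.foldl_cons]
      have hstep : pvStepG (gs ++ [g]) l = (gs ++ [g]) ++ [[l]] := by simp [pvStepG, h']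
      rw [hstep, ih]
      simp [pvSplitRest, h', List.append_assoc]
    · have h' := h; simp at h'
      rw [List.foldl_cons]
      have hstep : pvStepG (gs ++ [g]) l = gs ++ [g ++ [l]] := by
        simp [pvStepG, h', pvAppendLast_append]
      rw [hstep, ih]
      simp [pvSplitRest, h']

lemma pvBuildRecord_concat (g : List String) (l : String) :
    pvBuildRecord (g ++ [l]) = pvStepR (pvBuildRecord g) l := by
  simp [pvBuildRecord]

lemma pvStepA_nonpmid (st : List (PySem.Dict String String) × PySem.Dict String String)
    (l : String) (h : ¬ PySem.Str.startswith l "PMID:" = true) :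
    pvStepA st l = (st.1, pvStepR st.2 l) := by
  unfold pvStepA pvStepR
  rw [if_neg h, if_neg h]
  split_ifs <;> rfl

lemma pvLoopA_eq (lines : List String) : ∀ (abs : List (PySem.Dict String String)) (g : List String),
    (let st := lines.foldl pvStepA (abs, pvBuildRecord g)
     if st.2.items.isEmpty then st.1 else st.1 ++ [st.2]) =
    abs ++ ((pvSplitRest g lines).map pvBuildRecord).filter (fun r => !r.items.isEmpty) := by
  induction lines with
  | nil =>
    intro abs g
    cases h : (pvBuildRecord g).items.isEmpty <;>
      simp [pvSplitRest, List.filter, h]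
  | cons l ls ih =>
    intro abs g
    by_cases h : PySem.Str.startswith l "PMID:" = true
    · have h' := h; simp at h'
      rw [List.foldl_cons]
      have hstep : pvStepA (abs, pvBuildRecord g) l =
          ((if (pvBuildRecord g).items.isEmpty then abs else abs ++ [pvBuildRecord g]),
           pvBuildRecord [l]) := by
        simp [pvStepA, pvBuildRecord, pvStepR, h']
      rw [hstep]
      simp only [ih]
      cases hg : (pvBuildRecord g).items.isEmpty <;>
        simp [pvSplitRest, h', hg, List.append_assoc]
    · have h' := h; simp at h'
      rw [List.foldl_cons]
      have hstep : pvStepA (abs, pvBuildRecord g) l = (abs, pvBuildRecord (g ++ [l])) := by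
        rw [pvStepA_nonpmid _ _ h, pvBuildRecord_concat]
      rw [hstep]
      simp only [ih]
      simp [pvSplitRest, h']

-- ===== VERDICT (by name: the statement is the Claim_ definition above) =====
theorem parse_abstracts_py_spec : Claim_equal_parse_abstracts_py := by
  intro text _
  unfold Spec_parse_abstracts_py parse_abstracts_py parse_abstracts_py_alt
  have hg := pvGroups_eq ((PySem.Str.split? text "\n").getD []) [] []
  have hl := pvLoopA_eq ((PySem.Str.split? text "\n").getD []) [] []
  simp only [List.nil_append] at hg hl
  simp only [hg]
  have : (([], PySem.Dict.empty) :
      List (PySem.Dict String String) × PySem.Dict String String) = ([], pvBuildRecord []) := rfl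
  rw [this, hl]
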